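-- pv_equiv track=rewrite | github.com/Aryudesu/ABC | ABC/300_399/372/B.py | calc
-- ===== SOURCE A (Python) =====
-- def calc(M):
--     result = []
--     tmp = M
--     count = 0
--     while tmp > 0:
--         num = tmp % 3
--         tmp //= 3
--         for n in range(num):
--             result.append(count)
--         count += 1
--     return result
-- ===== SOURCE B (Python) =====
-- def calc(M):
--     # Greedy: repeatedly subtract the largest power of 3 that fits.
--     # Each base-3 digit d_e is at most 2, so exponent e is emitted exactly
--     # d_e times, in non-increasing order; reversing gives ascending order.
--     out = []
--     rem = M
--     while rem > 0:
--         e = 0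
--         p = 1
--         while p * 3 <= rem:
--             p *= 3
--             e += 1
--         rem -= p
--         out.append(e)
--     return list(reversed(out))
-- ===== Notes on version B (the rewrite author's own statement) =====
-- stated objective: alternative
-- what changed: A extracts base-3 digits low-to-high with %3 and //3, emitting each position digit-many times; B never takes a modulus: it greedily subtracts the largest power of 3 that still fits, collecting exponents high-to-low, and reverses at the end.
import Mathlib
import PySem

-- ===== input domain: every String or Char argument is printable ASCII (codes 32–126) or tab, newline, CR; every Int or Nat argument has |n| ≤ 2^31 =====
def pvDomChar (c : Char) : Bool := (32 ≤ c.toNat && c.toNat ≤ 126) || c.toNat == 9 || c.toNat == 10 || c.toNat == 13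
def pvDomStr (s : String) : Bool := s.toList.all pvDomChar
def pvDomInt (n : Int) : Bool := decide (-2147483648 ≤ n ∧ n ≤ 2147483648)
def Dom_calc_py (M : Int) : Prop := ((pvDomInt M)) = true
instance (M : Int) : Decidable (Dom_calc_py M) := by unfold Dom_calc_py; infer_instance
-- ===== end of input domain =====

-- B replaces A's low-to-high base-3 digit extraction by a greedy subtraction of the largest fitting power of 3 (exponents collected high-to-low, reversed at the end); alternative algorithm, same return value.


-- ===== PORT A =====
-- while tmp > 0: num = tmp % 3; tmp //= 3; for n in range(num): result.append(count); count += 1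
def calcALoop (tmp count : Int) (result : List Int) : List Int :=
  if h : tmp > 0 then
    calcALoop (PySem.Int.floordiv tmp 3) (count + 1)
      ((PySem.List.pyRange 0 (PySem.Int.mod tmp 3) 1).foldl (fun a _ => a ++ [count]) result)
  else result
termination_by tmp.toNat
decreasing_by
  exact (Int.toNat_lt_toNat h).mpr
    ((PySem.Int.floordiv_lt_iff_lt_mul (by decide)).mpr
      (lt_mul_of_one_lt_right h (by decide)))

def calc_py (M : Int) : List Int := calcALoop M 0 []

-- ===== PORT B =====
-- inner while: while p * 3 <= rem: p *= 3; e += 1   (the '0 < p' conjunct is only a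
-- totality guard for Lean's termination checker; calls always start from p = 1 > 0)
def findPow (rem p e : Int) : Int × Int :=
  if h : 0 < p ∧ p * 3 ≤ rem then findPow rem (p * 3) (e + 1) else (e, p)
termination_by (rem - p).toNat
decreasing_by
  exact (Int.toNat_lt_toNat
      (sub_pos.mpr (lt_of_lt_of_le (lt_mul_of_one_lt_right h.1 (by decide : (1:Int) < 3)) h.2))).mpr
    (sub_lt_sub_left (lt_mul_of_one_lt_right h.1 (by decide : (1:Int) < 3)) rem)

-- outer while needs: the p returned by the inner loop stays positive
theorem findPow_snd_pos_aux (n : Nat) : ∀ (rem p e : Int), (rem - p).toNat ≤ n → 0 < p →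
    0 < (findPow rem p e).2 := by
  induction n with
  | zero =>
    intro rem p e hn hp
    rw [findPow]
    split
    · next h =>
      have h0 : (0:Int) < rem - p :=
        sub_pos.mpr (lt_of_lt_of_le (lt_mul_of_one_lt_right h.1 (by decide : (1:Int) < 3)) h.2)
      exact absurd (lt_of_lt_of_le ((Int.toNat_lt_toNat h0).mpr h0) hn) (lt_irrefl 0)
    · exact hp
  | succ n ih =>
    intro rem p e hn hp
    rw [findPow]
    split
    · next h =>
      have hd : (rem - p * 3).toNat < (rem - p).toNat :=
        (Int.toNat_lt_toNat
            (sub_pos.mpr (lt_of_lt_of_le (lt_mul_of_one_lt_right h.1 (by decide : (1:Int) < 3)) h.2))).mpr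
          (sub_lt_sub_left (lt_mul_of_one_lt_right h.1 (by decide : (1:Int) < 3)) rem)
      exact ih rem (p * 3) (e + 1) (Nat.lt_succ_iff.mp (lt_of_lt_of_le hd hn))
        (mul_pos hp (by decide : (0:Int) < 3))
    · exact hp

theorem findPow_snd_pos (rem p e : Int) (hp : 0 < p) : 0 < (findPow rem p e).2 :=
  findPow_snd_pos_aux (rem - p).toNat rem p e le_rfl hp

-- while rem > 0: e = 0; p = 1; <inner while>; rem -= p; out.append(e)
def greedyLoop (rem : Int) (out : List Int) : List Int :=
  if h : rem > 0 then
    let ep := findPow rem 1 0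
    greedyLoop (rem - ep.2) (out ++ [ep.1])
  else out
termination_by rem.toNat
decreasing_by
  exact (Int.toNat_lt_toNat h).mpr (sub_lt_self rem (findPow_snd_pos rem 1 0 (by decide)))

-- return list(reversed(out))  → .reverse (exact: Python reversed() of a list)
def calc_py_alt (M : Int) : List Int := (greedyLoop M []).reverse

-- ===== PRECONDITION & SPEC =====
def Spec_calc_py (M : Int) (out : List Int) : Prop := out = calc_py_alt M
instance (M : Int) (out : List Int) : Decidable (Spec_calc_py M out) := by unfold Spec_calc_py; infer_instance

-- ===== CLAIM =====
def Claim_equal_calc_py : Prop := ∀ (M : Int), Dom_calc_py M → Spec_calc_py M (calc_py M)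

-- ===== LEMMAS AND PROOFS =====

-- common reference value: the base-3 expansion list, position `count` upward
def Fexp (tmp count : Int) : List Int :=
  if tmp > 0 then
    List.replicate (PySem.Int.mod tmp 3).toNat count ++ Fexp (PySem.Int.floordiv tmp 3) (count + 1)
  else []
termination_by tmp.toNat
decreasing_by
  rw [PySem.Int.floordiv_eq_ediv_of_pos (by norm_num : (0:Int) < 3)]; omega

theorem Fexp_unfold (tmp count : Int) (h : 0 ≤ tmp) :
    Fexp tmp count = List.replicate (tmp % 3).toNat count ++ Fexp (tmp / 3) (count + 1) := by
  rw [Fexp]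
  by_cases htmp : tmp > 0
  · rw [if_pos htmp, PySem.Int.mod_eq_emod_of_pos (by norm_num : (0:Int) < 3),
      PySem.Int.floordiv_eq_ediv_of_pos (by norm_num : (0:Int) < 3)]
  · have h0 : tmp = 0 := by omega
    subst h0
    rw [Fexp]
    norm_num
    rw [Fexp]
    norm_num

-- ----- A-side: calcALoop accumulates Fexp -----
theorem foldl_append_singleton (c : Int) (l : List Int) (res : List Int) :
    l.foldl (fun a (_ : Int) => a ++ [c]) res = res ++ l.map (fun _ => c) := by
  induction l generalizing res with
  | nil => simp
  | cons x xs ih => simp [List.foldl, ih]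

theorem map_const_pyRange (d c : Int) :
    (PySem.List.pyRange 0 d 1).map (fun _ => c) = List.replicate d.toNat c := by
  rw [PySem.List.pyRange_one]
  simp [Function.comp_def, List.map_const']

theorem calcALoop_eq (n : Nat) : ∀ (tmp count : Int) (res : List Int), tmp.toNat ≤ n →
    calcALoop tmp count res = res ++ Fexp tmp count := by
  induction n with
  | zero =>
    intro tmp count res h
    rw [calcALoop, Fexp]
    have : ¬ tmp > 0 := by omega
    simp [this]
  | succ n ih =>
    intro tmp count res h
    rw [calcALoop, Fexp]
    by_cases htmp : tmp > 0
    · have hlt : (PySem.Int.floordiv tmp 3).toNat ≤ n := by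
        rw [PySem.Int.floordiv_eq_ediv_of_pos (by norm_num : (0:Int) < 3)]; omega
      rw [dif_pos htmp, ih _ _ _ hlt, foldl_append_singleton, map_const_pyRange,
        List.append_assoc, if_pos htmp]
    · simp [htmp]

-- ----- B-side: the inner while finds the largest power of 3 that fits -----
theorem findPow_spec (j : Nat) : ∀ (rem p e : Int), 0 < p →
    p * 3 ^ j ≤ rem → rem < p * 3 ^ (j + 1) →
    findPow rem p e = (e + j, p * 3 ^ j) := by
  induction j with
  | zero =>
    intro rem p e hp h1 h2
    rw [findPow]
    have : ¬ (0 < p ∧ p * 3 ≤ rem) := by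
      rintro ⟨-, h⟩
      simp [pow_succ] at h2
      omega
    rw [dif_neg this]
    simp
  | succ j ih =>
    intro rem p e hp h1 h2
    rw [findPow]
    have h3 : p * 3 ≤ rem := by
      have : p * 3 ≤ p * 3 ^ (j + 1) := by
        have : (3:Int) ≤ 3 ^ (j + 1) := by
          calc (3:Int) = 3 ^ 1 := by norm_num
          _ ≤ 3 ^ (j + 1) := by
            apply pow_le_pow_right₀ <;> omega
        nlinarith
      omega
    rw [dif_pos ⟨hp, h3⟩, ih rem (p * 3) (e + 1) (by omega)
      (by rw [mul_assoc, ← pow_succ']; exact h1)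
      (by rw [mul_assoc, ← pow_succ']; exact h2)]
    rw [Prod.mk.injEq]
    refine ⟨by push_cast; ring, by rw [mul_assoc, ← pow_succ']⟩

-- every positive rem lies between consecutive powers of 3
theorem exists_exp (rem : Int) (h : 0 < rem) :
    ∃ e : Nat, (3:Int) ^ e ≤ rem ∧ rem < 3 ^ (e + 1) := by
  refine ⟨Nat.log 3 rem.toNat, ?_, ?_⟩
  · have h1 : (3:ℕ) ^ Nat.log 3 rem.toNat ≤ rem.toNat :=
      Nat.pow_log_le_self 3 (by omega)
    calc (3:Int) ^ Nat.log 3 rem.toNat = ((3 ^ Nat.log 3 rem.toNat : ℕ) : Int) := by push_cast; ring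
      _ ≤ (rem.toNat : Int) := by exact_mod_cast h1
      _ = rem := by omega
  · have h1 := Nat.lt_pow_succ_log_self (by norm_num : 1 < 3) rem.toNat
    calc rem = (rem.toNat : Int) := by omega
      _ < ((3 ^ (Nat.log 3 rem.toNat + 1) : ℕ) : Int) := by exact_mod_cast h1
      _ = 3 ^ (Nat.log 3 rem.toNat + 1) := by push_cast; ring

-- ----- the key arithmetic fact: removing the top power drops the last element -----
theorem Fexp_sub_pow (e : Nat) : ∀ (M c : Int), (3:Int) ^ e ≤ M → M < 3 ^ (e + 1) →
    Fexp M c = Fexp (M - 3 ^ e) c ++ [c + e] := by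
  induction e with
  | zero =>
    intro M c h1 h2
    norm_num at h1 h2 ⊢
    rw [Fexp_unfold M c (by omega), Fexp_unfold (M - 1) c (by omega)]
    have hq : M / 3 = 0 := by omega
    have hq' : (M - 1) / 3 = 0 := by omega
    have hr : M % 3 = M := by omega
    have hr' : (M - 1) % 3 = M - 1 := by omega
    rw [hq, hq', hr, hr']
    rw [Fexp]
    norm_num
    have hM : M.toNat = (M - 1).toNat + 1 := by omega
    rw [hM, List.replicate_succ']
    simp
  | succ e ih =>
    intro M c h1 h2
    have h3 : (3:Int) ^ (e + 1) = 3 * 3 ^ e := by rw [pow_succ']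
    have hpe : (0:Int) < 3 ^ e := by positivity
    have hM : 0 < M := by omega
    rw [Fexp_unfold M c (by omega), Fexp_unfold (M - 3 ^ (e + 1)) c (by omega)]
    have hmod : (M - 3 ^ (e + 1)) % 3 = M % 3 := by rw [h3]; omega
    have hdiv : (M - 3 ^ (e + 1)) / 3 = M / 3 - 3 ^ e := by rw [h3]; omega
    rw [hmod, hdiv, ih (M / 3) (c + 1) (by omega) (by rw [pow_succ'] at h2 ⊢; omega)]
    simp [List.append_assoc]
    ring_nf

-- ----- B-side: the greedy loop builds Fexp reversed -----
theorem greedyLoop_eq (n : Nat) : ∀ (rem : Int) (out : List Int), rem.toNat ≤ n →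
    greedyLoop rem out = out ++ (Fexp rem 0).reverse := by
  induction n with
  | zero =>
    intro rem out h
    rw [greedyLoop, Fexp]
    have : ¬ rem > 0 := by omega
    simp [this]
  | succ n ih =>
    intro rem out h
    rw [greedyLoop]
    by_cases hrem : rem > 0
    · obtain ⟨e, he1, he2⟩ := exists_exp rem hrem
      have hfp : findPow rem 1 0 = ((e : Int), 3 ^ e) := by
        have := findPow_spec e rem 1 0 (by norm_num) (by omega) (by omega)
        simpa using this
      have hpe : (0:Int) < 3 ^ e := by positivity
      rw [dif_pos hrem]
      simp only [hfp]
      rw [ih (rem - 3 ^ e) (out ++ [(e : Int)]) (by omega),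
        Fexp_sub_pow e rem 0 he1 he2]
      simp
    · rw [dif_neg hrem, Fexp]
      simp [hrem]

-- ===== VERDICT =====
theorem calc_py_spec : Claim_equal_calc_py := by
  intro M _
  unfold Spec_calc_py calc_py calc_py_alt
  rw [calcALoop_eq M.toNat M 0 [] le_rfl, greedyLoop_eq M.toNat M [] le_rfl]
  simp
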